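-- pv_equiv track=rewrite | github.com/kangwonlee/nmisp | get_cpp_from_ipynb.py | get_build_command_in_last_line
-- ===== SOURCE A (Python) =====
-- def get_build_command_in_last_line(cpp_txt):
--     """
--     From the last line of cpp_txt, get the build command
--
--     Expected input argument:
--     // ...
--     // End account_module_user.cpp
--     // Build command : g++ -Wall -g account_module.cpp account_module_user.cpp
--     // ```
--
--     Expected output argument in this case:
--     "g++ -Wall -g account_module.cpp account_module_user.cpp"
--     """
--
--     result = ""
--
--     # Starting from the last line.
--     cpp_lines = cpp_txt.splitlines()
--     cpp_lines.reverse()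
--
--     # Source code loop
--     for line in cpp_lines:
--         # Check comment lines only
--         if line.strip().lower().startswith('//'):
--             # ignore if too short
--             if 4 < len(line.lower().split()):
--                 # Check words
--                 if (
--                     ('build' == line.lower().split()[1])
--                     and ('command' == line.lower().split()[2])
--                     and (':' == line.lower().split()[3])
--                 ):
--                     # reassemble compile command
--                     result = ' '.join(line.split()[4:])
--                     break
--
--     return result
-- ===== SOURCE B (Python) =====
-- def get_build_command_in_last_line(cpp_txt):
--     """Staged pipeline: collect the payloads of every matching comment line, return the last."""
--     def is_build_comment(line):
--         words = line.lower().split()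
--         return (line.strip().lower().startswith('//')
--                 and len(words) > 4
--                 and words[1:4] == ['build', 'command', ':'])
--     matches = [' '.join(line.split()[4:])
--                for line in cpp_txt.splitlines()
--                if is_build_comment(line)]
--     return matches[-1] if matches else ""
-- ===== Notes on version B (the rewrite author's own statement) =====
-- stated objective: alternative
-- what changed: B replaces A's reversed scan with break by a staged filter-map pipeline: a list comprehension collects the payloads of all matching lines (predicate expressed as a slice comparison words[1:4] == ['build','command',':']) and the last collected payload is returned.
import Mathlib
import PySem

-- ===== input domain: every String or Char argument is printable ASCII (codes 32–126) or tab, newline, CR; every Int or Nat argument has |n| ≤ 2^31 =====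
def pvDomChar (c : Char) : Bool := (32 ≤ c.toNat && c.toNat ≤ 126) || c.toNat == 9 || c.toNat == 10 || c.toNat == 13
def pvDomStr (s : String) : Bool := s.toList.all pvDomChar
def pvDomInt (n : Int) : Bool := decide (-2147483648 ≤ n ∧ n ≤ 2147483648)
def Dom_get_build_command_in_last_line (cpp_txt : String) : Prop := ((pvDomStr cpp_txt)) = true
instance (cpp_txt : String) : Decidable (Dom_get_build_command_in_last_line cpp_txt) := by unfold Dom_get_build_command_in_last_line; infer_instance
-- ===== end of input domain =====

-- B replaces A's reversed scan with break by a staged filter-map pipeline (collect all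
-- matching payloads, return the last); return values proved equal on all of Dom.

-- ===== PORT A =====
-- A's loop over the reversed lines, with `break` rendered as returning on the first match.
def pvLoopA : List String → String
  | [] => ""
  | line :: rest =>
    if PySem.Str.startswith (PySem.Str.lower (PySem.Str.strip line)) "//" then
      if 4 < (PySem.Str.split₀ (PySem.Str.lower line)).length then
        -- the guard ensures indices 1..3 are in range, so getD is exact here
        if ((PySem.Str.split₀ (PySem.Str.lower line)).getD 1 "" == "build")
            && ((PySem.Str.split₀ (PySem.Str.lower line)).getD 2 "" == "command")
            && ((PySem.Str.split₀ (PySem.Str.lower line)).getD 3 "" == ":") then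
          PySem.Str.join " " ((PySem.Str.split₀ line).drop 4)
        else pvLoopA rest
      else pvLoopA rest
    else pvLoopA rest

def get_build_command_in_last_line (cpp_txt : String) : String :=
  pvLoopA (PySem.Str.splitlines cpp_txt).reverse

-- ===== PORT B =====
-- is_build_comment(line): predicate via the slice comparison words[1:4] == ['build','command',':']
def pvIsBuildComment (line : String) : Bool :=
  let words := PySem.Str.split₀ (PySem.Str.lower line)
  PySem.Str.startswith (PySem.Str.lower (PySem.Str.strip line)) "//"
    && decide (4 < words.length)
    && (PySem.List.slice words (some 1) (some 4) == ["build", "command", ":"])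

def get_build_command_in_last_line_alt (cpp_txt : String) : String :=
  let ms :=
    ((PySem.Str.splitlines cpp_txt).filter pvIsBuildComment).map
      (fun line => PySem.Str.join " " ((PySem.Str.split₀ line).drop 4))
  if ms.isEmpty then "" else ms.getLastD ""

-- ===== PRECONDITION & SPEC =====
def Spec_get_build_command_in_last_line (cpp_txt : String) (out : String) : Prop := out = get_build_command_in_last_line_alt cpp_txt
instance (cpp_txt : String) (out : String) : Decidable (Spec_get_build_command_in_last_line cpp_txt out) := by unfold Spec_get_build_command_in_last_line; infer_instance

-- ===== CLAIM (what is proved, stated in full; the proofs are below) =====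
def Claim_equal_get_build_command_in_last_line : Prop := ∀ (cpp_txt : String), Dom_get_build_command_in_last_line cpp_txt → Spec_get_build_command_in_last_line cpp_txt (get_build_command_in_last_line cpp_txt)

-- ===== LEMMAS AND PROOFS =====

def pvPayload (line : String) : String :=
  PySem.Str.join " " ((PySem.Str.split₀ line).drop 4)

-- A's per-line condition, and its agreement with B's slice-based predicate
def pvCondA (line : String) : Bool :=
  PySem.Str.startswith (PySem.Str.lower (PySem.Str.strip line)) "//"
    && decide (4 < (PySem.Str.split₀ (PySem.Str.lower line)).length)
    && ((PySem.Str.split₀ (PySem.Str.lower line)).getD 1 "" == "build")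
    && ((PySem.Str.split₀ (PySem.Str.lower line)).getD 2 "" == "command")
    && ((PySem.Str.split₀ (PySem.Str.lower line)).getD 3 "" == ":")

lemma cond_eq (line : String) : pvIsBuildComment line = pvCondA line := by
  unfold pvIsBuildComment pvCondA
  rcases h : PySem.Str.split₀ (PySem.Str.lower line) with _ | ⟨w0, _ | ⟨w1, _ | ⟨w2, _ | ⟨w3, _ | ⟨w4, rest⟩⟩⟩⟩⟩ <;>
    simp [PySem.List.slice, List.getD, Bool.and_assoc]

lemma loopA_cons (line : String) (rest : List String) :
    pvLoopA (line :: rest) = if pvCondA line then pvPayload line else pvLoopA rest := by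
  rw [pvLoopA, pvCondA, pvPayload]
  split_ifs <;> simp_all <;> omega

lemma key (ls : List String) :
    (if ((ls.filter pvIsBuildComment).map pvPayload).isEmpty then ""
     else ((ls.filter pvIsBuildComment).map pvPayload).getLastD "") = pvLoopA ls.reverse := by
  induction ls using List.reverseRecOn with
  | nil => rfl
  | append_singleton xs x ih =>
    rw [List.reverse_append, List.reverse_singleton, List.singleton_append, loopA_cons,
      List.filter_append, List.map_append, List.filter_singleton, cond_eq]
    cases hx : pvCondA x with
    | true => simp
    | false => simpa using ih

-- ===== VERDICT (by name: the statement is the Claim_ definition above) =====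
theorem get_build_command_in_last_line_spec : Claim_equal_get_build_command_in_last_line := by
  intro cpp_txt _
  unfold Spec_get_build_command_in_last_line get_build_command_in_last_line
    get_build_command_in_last_line_alt
  exact (key _).symm
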